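-- pv_equiv track=rewrite | github.com/junaidgirkar/DJSCE | SEM 5/AI/PRACTICALS/Experiment 4/steepest_ascent.py | state_generation
-- ===== SOURCE A (Python) =====
-- def calculate_cost(list):
--     list_copy = list
--     cost = 0
--     for i in range(len(list_copy)):
--         l1=list[(i+1) : len(list)]
--         ls = [j for j in l1 if list_copy[i]>j ]
--         cost = cost + len(ls)
--     return cost
--
-- def state_generation(current_state, current_state_cost):
--     min_cost = current_state_cost
--     sli_state = current_state.copy()
--     for i in range(len(current_state)-1):
--         for j in range(i+1,len(current_state)):
--             sli_state[i],sli_state[j] = sli_state[j],sli_state[i]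
--             iteration_cost = calculate_cost(sli_state)
--             if(iteration_cost < min_cost):
--                 min_cost = iteration_cost
--                 min_state = sli_state.copy()
--             sli_state = current_state.copy()
--
--     if(min_cost < current_state_cost):
--         return min_state,min_cost
--     else:
--         return current_state,None
-- ===== SOURCE B (Python) =====
-- def state_generation(current_state, current_state_cost):
--     n = len(current_state)
--     base = 0
--     for p in range(n):
--         v = current_state[p]
--         base += sum(1 for e in current_state[p + 1:] if v > e)
--     best = current_state_cost
--     best_pair = None
--     for i in range(n - 1):
--         a = current_state[i]
--         for j in range(i + 1, n):
--             b = current_state[j]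
--             delta = (b > a) - (a > b)
--             for e in current_state[i + 1:j]:
--                 delta += (b > e) - (a > e) + ((e > a) - (e > b))
--             cand = base + delta
--             if cand < best:
--                 best = cand
--                 best_pair = (i, j)
--     if best_pair is None:
--         return current_state, None
--     res = current_state.copy()
--     i, j = best_pair
--     res[i], res[j] = res[j], res[i]
--     return res, best
-- ===== Notes on version B (the rewrite author's own statement) =====
-- stated objective: faster
-- what changed: Instead of rebuilding the swapped list and recounting all inversions from scratch for every candidate swap, B counts the base inversions once and computes each swap's new cost with an O(j-i) incremental delta over the elements between the swapped positions, remembering only the best (i,j) pair and materialising the swapped list once at the end.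
import Mathlib
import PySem

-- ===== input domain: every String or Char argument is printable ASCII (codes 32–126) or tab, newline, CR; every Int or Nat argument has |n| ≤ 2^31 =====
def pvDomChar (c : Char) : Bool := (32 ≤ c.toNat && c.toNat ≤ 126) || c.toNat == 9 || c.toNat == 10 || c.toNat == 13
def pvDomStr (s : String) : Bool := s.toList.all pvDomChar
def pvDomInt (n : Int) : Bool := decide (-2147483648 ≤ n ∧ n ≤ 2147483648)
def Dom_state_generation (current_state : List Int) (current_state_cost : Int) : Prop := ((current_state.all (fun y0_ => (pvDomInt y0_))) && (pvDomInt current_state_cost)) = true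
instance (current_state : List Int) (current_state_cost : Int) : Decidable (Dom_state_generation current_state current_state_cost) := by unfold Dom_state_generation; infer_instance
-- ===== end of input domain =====

-- B replaces A's full O(n^2) inversion recount per swap by one base count plus an O(j-i)
-- incremental delta per swap (O(n^4) → O(n^3)); return value only, A mutates no argument it keeps.

-- ===== PORT A =====
-- Python tuple-assignment swap `l[i],l[j] = l[j],l[i]`; indices produced by A's loops are
-- always in range, so getD's default is never used.
def pySwap (l : List Int) (i j : Nat) : List Int :=
  (l.set i (l.getD j 0)).set j (l.getD i 0)

-- literal port of calculate_cost: for i in range(len): slice list[i+1:len], filter, add length.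
-- list[i+1:len] with 0 ≤ i+1 is List.drop (i+1); range(len) is List.range (indices all ≥ 0).
def calculate_cost (list : List Int) : Int :=
  (List.range list.length).foldl
    (fun cost i =>
      let l1 := list.drop (i + 1)
      let ls := l1.filter (fun j => decide (list.getD i 0 > j))
      cost + (ls.length : Int)) 0

-- A's inner-loop body: swap in sli_state, recompute full cost, update min, reset sli_state.
def stepA (x : List Int) (i : Nat) (st : Int × Option (List Int) × List Int) (j : Nat) :
    Int × Option (List Int) × List Int :=
  let sli' := pySwap st.2.2 i j
  let ic := calculate_cost sli'
  if ic < st.1 then (ic, some sli', x) else (st.1, st.2.1, x)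

-- range(len-1) / range(i+1, len) are List.range / List.range' (all bounds ≥ 0).
def state_generation (current_state : List Int) (current_state_cost : Int) :
    List Int × Option Int :=
  let res := (List.range (current_state.length - 1)).foldl
      (fun st i =>
        (List.range' (i + 1) (current_state.length - (i + 1))).foldl
          (stepA current_state i) st)
      (current_state_cost, none, current_state)
  -- min_state is always assigned when min_cost < current_state_cost, so getD's default is dead
  if res.1 < current_state_cost then (res.2.1.getD current_state, some res.1)
  else (current_state, none)

-- ===== PORT B =====
-- Source B's base loop: sum over p of the count of smaller later elements (slice x[p+1:] = drop).
def inv_count (x : List Int) : Int :=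
  (List.range x.length).foldl
    (fun s p => s + (((x.drop (p + 1)).countP (fun e => decide (x.getD p 0 > e))) : Int)) 0

def boolToInt (b : Bool) : Int := if b then 1 else 0

-- Source B's delta of one swap: only the endpoints and the elements strictly between them move;
-- one fused pass over the middle slice accumulates all four comparison counts.
def delta_fn (a b : Int) (m : List Int) : Int :=
  m.foldl
    (fun s e => s + (boolToInt (b > e) - boolToInt (a > e) + (boolToInt (e > a) - boolToInt (e > b))))
    (boolToInt (b > a) - boolToInt (a > b))

-- Source B's inner-loop body: cand = base + delta, update (best, best_pair).
def stepB (x : List Int) (base : Int) (i : Nat) (st : Int × Option (Nat × Nat)) (j : Nat) :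
    Int × Option (Nat × Nat) :=
  let b := x.getD j 0
  let m := (x.drop (i + 1)).take (j - (i + 1))   -- x[i+1:j]
  let cand := base + delta_fn (x.getD i 0) b m
  if cand < st.1 then (cand, some (i, j)) else st

def state_generation_alt (current_state : List Int) (current_state_cost : Int) :
    List Int × Option Int :=
  let base := inv_count current_state
  let res := (List.range (current_state.length - 1)).foldl
      (fun st i =>
        (List.range' (i + 1) (current_state.length - (i + 1))).foldl
          (stepB current_state base i) st)
      (current_state_cost, none)
  match res.2 with
  | none => (current_state, none)
  | some (i, j) => (pySwap current_state i j, some res.1)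

-- ===== PRECONDITION & SPEC =====
def Spec_state_generation (current_state : List Int) (current_state_cost : Int) (out : List Int × Option Int) : Prop := out = state_generation_alt current_state current_state_cost
instance (current_state : List Int) (current_state_cost : Int) (out : List Int × Option Int) : Decidable (Spec_state_generation current_state current_state_cost out) := by unfold Spec_state_generation; infer_instance

-- ===== CLAIM (what is proved, stated in full; the proofs are below) =====
def Claim_equal_state_generation : Prop := ∀ (current_state : List Int) (current_state_cost : Int), Dom_state_generation current_state current_state_cost → Spec_state_generation current_state current_state_cost (state_generation current_state current_state_cost)

-- ===== LEMMAS AND PROOFS =====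

-- clean recursive inversion count
def invL : List Int → Int
  | [] => 0
  | a :: t => ((t.countP (fun e => decide (a > e))) : Int) + invL t

-- cross inversions between a left and a right block
def crossL (p q : List Int) : Int :=
  (p.map (fun c => ((q.countP (fun e => decide (c > e))) : Int))).sum

lemma delta_fold (a b : Int) (m : List Int) (acc : Int) :
    m.foldl
      (fun s e => s + (boolToInt (b > e) - boolToInt (a > e) + (boolToInt (e > a) - boolToInt (e > b))))
      acc
    = acc
      + (((m.countP (fun e => decide (b > e))) : Int) - ((m.countP (fun e => decide (a > e))) : Int))
      + (((m.countP (fun e => decide (e > a))) : Int) - ((m.countP (fun e => decide (e > b))) : Int)) := by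
  induction m generalizing acc with
  | nil => simp
  | cons e t ih =>
    rw [List.foldl_cons, ih]
    simp only [List.countP_cons, boolToInt]
    by_cases h1 : b > e <;> by_cases h2 : a > e <;> by_cases h3 : e > a <;> by_cases h4 : e > b <;>
      simp [h1, h2, h3, h4] <;> ring

lemma delta_fn_eq (a b : Int) (m : List Int) :
    delta_fn a b m
    = (boolToInt (b > a) - boolToInt (a > b))
      + (((m.countP (fun e => decide (b > e))) : Int) - ((m.countP (fun e => decide (a > e))) : Int))
      + (((m.countP (fun e => decide (e > a))) : Int) - ((m.countP (fun e => decide (e > b))) : Int)) := by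
  rw [delta_fn, delta_fold]

lemma fold_count_eq_invL (x : List Int) (acc : Int) :
    (List.range x.length).foldl
      (fun s p => s + (((x.drop (p + 1)).countP (fun e => decide (x.getD p 0 > e))) : Int)) acc
    = acc + invL x := by
  induction x generalizing acc with
  | nil => simp [invL]
  | cons a t ih =>
    rw [List.length_cons, List.range_succ_eq_map, List.foldl_cons, List.foldl_map]
    simp only [List.drop_succ_cons, List.getD_cons_succ, List.drop_zero, List.getD_cons_zero]
    rw [ih]
    simp [invL]; ring

lemma calculate_cost_eq_invL (x : List Int) : calculate_cost x = invL x := by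
  have := fold_count_eq_invL x 0
  simpa [calculate_cost, List.countP_eq_length_filter] using this

lemma inv_count_eq_invL (x : List Int) : inv_count x = invL x := by
  simpa [inv_count] using fold_count_eq_invL x 0

lemma invL_append (p q : List Int) : invL (p ++ q) = invL p + invL q + crossL p q := by
  induction p with
  | nil => simp [invL, crossL]
  | cons a t ih => simp [invL, crossL, List.countP_append, ih]; ring

lemma crossL_cons_right (p : List Int) (c : Int) (q : List Int) :
    crossL p (c :: q) = ((p.countP (fun e => decide (e > c))) : Int) + crossL p q := by
  induction p with
  | nil => simp [crossL]
  | cons a t ih =>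
    simp only [crossL, List.map_cons, List.sum_cons, List.countP_cons] at *
    rw [ih]
    by_cases h : a > c <;> simp [h] <;> ring

lemma crossL_countP_congr (p q q' : List Int)
    (h : ∀ c : Int, q.countP (fun e => decide (c > e)) = q'.countP (fun e => decide (c > e))) :
    crossL p q = crossL p q' := by
  unfold crossL
  congr 1
  exact List.map_congr_left (fun c _ => by rw [h c])

-- the heart: inversion count after swapping the two endpoints around a middle block
lemma invL_cons_mid (c d : Int) (m v : List Int) :
    invL (c :: (m ++ d :: v))
      = ((m.countP (fun e => decide (c > e))) : Int) + boolToInt (decide (c > d))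
        + ((v.countP (fun e => decide (c > e))) : Int)
        + invL m + ((v.countP (fun e => decide (d > e))) : Int) + invL v
        + crossL m v + ((m.countP (fun e => decide (e > d))) : Int) := by
  rw [invL, invL_append, crossL_cons_right, invL]
  simp only [List.countP_append, List.countP_cons, boolToInt]
  by_cases h : c > d <;> simp [h] <;> ring

lemma invL_swap_core (u m v : List Int) (a b : Int) :
    invL (u ++ b :: (m ++ a :: v)) = invL (u ++ a :: (m ++ b :: v)) + delta_fn a b m := by
  rw [invL_append u (b :: (m ++ a :: v)), invL_append u (a :: (m ++ b :: v))]
  have hcross : crossL u (b :: (m ++ a :: v)) = crossL u (a :: (m ++ b :: v)) := by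
    apply crossL_countP_congr
    intro c
    simp only [List.countP_cons, List.countP_append]
    by_cases h1 : c > a <;> by_cases h2 : c > b <;> simp [h1, h2] <;> omega
  rw [hcross, invL_cons_mid b a m v, invL_cons_mid a b m v, delta_fn_eq]
  simp only [boolToInt]
  by_cases h1 : b > a <;> by_cases h2 : a > b <;> simp [h1, h2] <;> ring

-- decomposition of x around positions i < j
lemma decomp (x : List Int) (i j : Nat) (hij : i < j) (hj : j < x.length) :
    x = x.take i ++ x.getD i 0 ::
        ((x.drop (i + 1)).take (j - (i + 1)) ++ x.getD j 0 :: x.drop (j + 1)) := by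
  have hi : i < x.length := lt_trans hij hj
  conv_lhs => rw [← List.take_append_drop i x]
  congr 1
  rw [List.drop_eq_getElem_cons hi, List.getD_eq_getElem x 0 hi]
  congr 1
  conv_lhs => rw [← List.take_append_drop (j - (i + 1)) (x.drop (i + 1))]
  congr 1
  rw [List.drop_drop]
  have hjj : i + 1 + (j - (i + 1)) = j := by omega
  rw [hjj, List.drop_eq_getElem_cons hj, List.getD_eq_getElem x 0 hj]

lemma set_append_len {α : Type} (u : List α) (a c : α) (t : List α) :
    (u ++ a :: t).set u.length c = u ++ c :: t := by
  induction u with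
  | nil => simp
  | cons h tl ih => simp [ih]

lemma getD_append_len (u : List Int) (a : Int) (t : List Int) :
    (u ++ a :: t).getD u.length 0 = a := by
  induction u with
  | nil => simp
  | cons h tl ih => simp

lemma swap_general (u m v : List Int) (a b : Int) (i j : Nat)
    (hi : i = u.length) (hj : j = u.length + 1 + m.length) :
    pySwap (u ++ a :: (m ++ b :: v)) i j = u ++ b :: (m ++ a :: v) := by
  subst hi hj
  have hassoc : ∀ c d : Int, u ++ c :: (m ++ d :: v) = (u ++ c :: m) ++ d :: v := by
    intro c d; simp
  have hlen : ∀ c : Int, (u ++ c :: m).length = u.length + 1 + m.length := by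
    intro c; simp; omega
  unfold pySwap
  rw [getD_append_len u a (m ++ b :: v)]
  rw [hassoc a b, ← hlen a, getD_append_len (u ++ a :: m) b v, hlen a, ← hassoc a b]
  rw [set_append_len u a b (m ++ b :: v)]
  rw [hassoc b b, ← hlen b, set_append_len (u ++ b :: m) b a v, ← hassoc b a]

lemma cost_swap_general (u m v : List Int) (a b : Int) :
    invL (pySwap (u ++ a :: (m ++ b :: v)) u.length (u.length + 1 + m.length))
      = invL (u ++ a :: (m ++ b :: v)) + delta_fn a b m := by
  rw [swap_general u m v a b _ _ rfl rfl]
  exact invL_swap_core u m v a b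

-- swap cost = base + delta
lemma cost_swap (x : List Int) (i j : Nat) (hij : i < j) (hj : j < x.length) :
    calculate_cost (pySwap x i j)
      = invL x + delta_fn (x.getD i 0) (x.getD j 0) ((x.drop (i + 1)).take (j - (i + 1))) := by
  have hi : i < x.length := lt_trans hij hj
  have hu : (x.take i).length = i := by simp; omega
  have hm : ((x.drop (i + 1)).take (j - (i + 1))).length = j - (i + 1) := by
    simp; omega
  have hx := decomp x i j hij hj
  have key := cost_swap_general (x.take i) ((x.drop (i + 1)).take (j - (i + 1)))
      (x.drop (j + 1)) (x.getD i 0) (x.getD j 0)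
  rw [← hx, hu, hm] at key
  have hjj : i + 1 + (j - (i + 1)) = j := by omega
  rw [hjj] at key
  rw [calculate_cost_eq_invL]
  exact key

-- invariant of B's accumulator relative to the initial cost c
def InvB (c : Int) (st : Int × Option (Nat × Nat)) : Prop :=
  (st.2 = none → st.1 = c) ∧ (∀ q : Nat × Nat, st.2 = some q → st.1 < c)

def liftB (x : List Int) (st : Int × Option (Nat × Nat)) : Int × Option (List Int) × List Int :=
  (st.1, st.2.map (fun q => pySwap x q.1 q.2), x)

lemma step_corr (x : List Int) (c base : Int) (hbase : base = invL x) (i : Nat)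
    (js : List Nat) (hjs : ∀ j ∈ js, i < j ∧ j < x.length)
    (st : Int × Option (Nat × Nat)) (hst : InvB c st) :
    js.foldl (stepA x i) (liftB x st) = liftB x (js.foldl (stepB x base i) st)
    ∧ InvB c (js.foldl (stepB x base i) st) := by
  induction js generalizing st with
  | nil => exact ⟨rfl, hst⟩
  | cons j js ih =>
    have hj := hjs j (by simp)
    have hrest : ∀ j' ∈ js, i < j' ∧ j' < x.length := fun j' h => hjs j' (by simp [h])
    have hcost : calculate_cost (pySwap x i j)
        = base + delta_fn (x.getD i 0) (x.getD j 0) ((x.drop (i + 1)).take (j - (i + 1))) := by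
      rw [hbase]; exact cost_swap x i j hj.1 hj.2
    have hle : st.1 ≤ c := by
      rcases h : st.2 with _ | q
      · exact le_of_eq (hst.1 h)
      · exact le_of_lt (hst.2 q h)
    simp only [List.foldl_cons]
    have hstep : stepA x i (liftB x st) j = liftB x (stepB x base i st j) := by
      simp only [stepA, stepB, liftB, hcost]
      split_ifs with h
      · rfl
      · rfl
    rw [hstep]
    apply ih hrest
    simp only [stepB]
    split_ifs with h
    · exact ⟨fun hn => by simp at hn, fun q hq => lt_of_lt_of_le h hle⟩
    · exact hst

lemma outer_corr (x : List Int) (c base : Int) (hbase : base = invL x)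
    (is : List Nat) (his : ∀ i ∈ is, i + 1 ≤ x.length)
    (st : Int × Option (Nat × Nat)) (hst : InvB c st) :
    is.foldl (fun st i =>
        (List.range' (i + 1) (x.length - (i + 1))).foldl (stepA x i) st) (liftB x st)
      = liftB x (is.foldl (fun st i =>
        (List.range' (i + 1) (x.length - (i + 1))).foldl (stepB x base i) st) st)
    ∧ InvB c (is.foldl (fun st i =>
        (List.range' (i + 1) (x.length - (i + 1))).foldl (stepB x base i) st) st) := by
  induction is generalizing st with
  | nil => exact ⟨rfl, hst⟩
  | cons i is ih =>
    have hi := his i (by simp)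
    have hrest : ∀ i' ∈ is, i' + 1 ≤ x.length := fun i' h => his i' (by simp [h])
    have hjs : ∀ j ∈ List.range' (i + 1) (x.length - (i + 1)), i < j ∧ j < x.length := by
      intro j hjmem
      rw [List.mem_range'] at hjmem
      obtain ⟨k, hk, hj⟩ := hjmem
      omega
    simp only [List.foldl_cons]
    obtain ⟨h1, h2⟩ := step_corr x c base hbase i _ hjs st hst
    rw [h1]
    exact ih hrest _ h2

-- ===== VERDICT (by name: the statement is the Claim_ definition above) =====
theorem state_generation_spec : Claim_equal_state_generation := by
  intro x c _
  dsimp only [Spec_state_generation, state_generation, state_generation_alt]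
  have hbase : inv_count x = invL x := inv_count_eq_invL x
  have his : ∀ i ∈ List.range (x.length - 1), i + 1 ≤ x.length := by
    intro i hi; rw [List.mem_range] at hi; omega
  have hst0 : InvB c (c, (none : Option (Nat × Nat))) :=
    ⟨fun _ => rfl, fun q hq => by simp at hq⟩
  obtain ⟨h1, h2⟩ := outer_corr x c (inv_count x) hbase (List.range (x.length - 1))
    his (c, none) hst0
  have hlift0 : (c, (none : Option (List Int)), x) = liftB x (c, none) := rfl
  rw [hlift0, h1]
  set res := (List.range (x.length - 1)).foldl (fun st i =>
      (List.range' (i + 1) (x.length - (i + 1))).foldl (stepB x (inv_count x) i) st)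
      (c, none) with hres
  rcases hp : res.2 with _ | ⟨i, j⟩
  · have hc : res.1 = c := h2.1 hp
    simp [liftB, hp, hc]
  · have hc : res.1 < c := h2.2 (i, j) hp
    simp [liftB, hp, hc]
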